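-- pv_equiv track=rewrite | github.com/kimjune01/june.kim | worklog/sjt_cps_v3_final.py | brute_force_optimal
-- ===== SOURCE A (Python) =====
-- import itertools
--
-- def consecutive_sym_diffs(ordering, neighborhoods):
--     return [len(neighborhoods[ordering[i]] ^ neighborhoods[ordering[i+1]])
--             for i in range(len(ordering) - 1)]
--
-- def brute_force_optimal(emitters, neighborhoods):
--     if len(emitters) > 11:
--         return None, None
--     best_max = float('inf')
--     best_ord = None
--     for perm in itertools.permutations(emitters):
--         diffs = consecutive_sym_diffs(perm, neighborhoods)
--         mx = max(diffs) if diffs else 0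
--         if mx < best_max:
--             best_max = mx
--             best_ord = perm
--     return best_ord, best_max
-- ===== SOURCE B (Python) =====
-- def brute_force_optimal(emitters, neighborhoods):
--     if len(emitters) > 11:
--         return None, None
--
--     def dfs(remaining, last, cur_max, path, best):
--         # branch-and-bound: every completion of this prefix has max >= cur_max
--         if best is not None and cur_max >= best[1]:
--             return best
--         if not remaining:
--             return (path, cur_max)
--         for i in range(len(remaining)):
--             e = remaining[i]
--             if last is None:
--                 d = cur_max
--             else:
--                 d = max(cur_max, len(neighborhoods[last] ^ neighborhoods[e]))
--             best = dfs(remaining[:i] + remaining[i+1:], e, d, path + (e,), best)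
--         return best
--
--     best = dfs(tuple(emitters), None, 0, (), None)
--     if best is None:
--         return None, None
--     return best[0], best[1]
-- ===== Notes on version B (the rewrite author's own statement) =====
-- stated objective: alternative
-- what changed: A folds over all n! permutations from itertools; B does a depth-first search over prefixes that carries the running maximum edge cost and prunes every subtree whose prefix maximum already reaches the best bottleneck found, visiting prefixes in the same index order so the first optimal permutation found is identical.
import Mathlib
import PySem

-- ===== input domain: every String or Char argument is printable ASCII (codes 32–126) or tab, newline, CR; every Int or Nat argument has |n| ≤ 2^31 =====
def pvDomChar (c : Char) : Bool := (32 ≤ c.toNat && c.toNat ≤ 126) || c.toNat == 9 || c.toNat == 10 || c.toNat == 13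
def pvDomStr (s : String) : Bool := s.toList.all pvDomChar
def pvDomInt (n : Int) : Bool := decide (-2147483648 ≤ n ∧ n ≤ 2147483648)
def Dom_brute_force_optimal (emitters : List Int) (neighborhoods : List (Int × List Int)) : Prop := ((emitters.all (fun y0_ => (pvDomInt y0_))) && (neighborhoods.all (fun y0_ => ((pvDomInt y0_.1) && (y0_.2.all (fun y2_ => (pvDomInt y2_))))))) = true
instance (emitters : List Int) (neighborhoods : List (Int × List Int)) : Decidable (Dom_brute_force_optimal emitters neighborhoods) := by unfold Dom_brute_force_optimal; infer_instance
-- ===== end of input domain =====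

-- ===== PORT A =====
-- B replaces A's fold over the full itertools permutation list by a depth-first search over prefixes that
-- carries the running maximum edge cost and prunes subtrees the incumbent bottleneck already dominates (alternative algorithm, same result).
-- A-side helper: consecutive_sym_diffs(ordering, neighborhoods). Dict lookup totalized with getD [] (KeyError excluded by Pre_);
-- list indexing totalized with pyGetD (indices from range(len-1) are always in range).
def consecutive_sym_diffs (ordering : List Int) (neighborhoods : List (Int × List Int)) : List Int :=
  (PySem.List.pyRange 0 ((ordering.length : Int) - 1)).map
    (fun i => PySem.Set.len (PySem.Set.symmDiff
      (PySem.Dict.getD (PySem.Dict.mk neighborhoods) (PySem.List.pyGetD ordering i 0) [])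
      (PySem.Dict.getD (PySem.Dict.mk neighborhoods) (PySem.List.pyGetD ordering (i + 1) 0) [])))

-- the body of A's 'for perm in itertools.permutations(...)' loop; best_max = None stands for float('inf')
def pvBestStep (neighborhoods : List (Int × List Int)) (st : Option (List Int) × Option Int)
    (perm : List Int) : Option (List Int) × Option Int :=
  let diffs := consecutive_sym_diffs perm neighborhoods
  let mx : Int := match PySem.List.max? diffs (fun x => x) with | none => 0 | some m => m
  if (match st.2 with | none => true | some bm => mx < bm) then (some perm, some mx) else st

def brute_force_optimal (emitters : List Int) (neighborhoods : List (Int × List Int)) :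
    Option (List Int) × Option Int :=
  if 11 < emitters.length then (none, none)
  else (PySem.List.permutations emitters emitters.length).foldl (pvBestStep neighborhoods) (none, none)

-- ===== PORT B =====
-- B-side: depth-first search over partial orderings, carrying the running max edge cost, pruned by the best found so far
def pvDfs (nb : List (Int × List Int)) (remaining : List Int) (last : Option Int) (curMax : Int)
    (path : List Int) (best : Option (List Int × Int)) : Option (List Int × Int) :=
  if (match best with | some (_, bm) => decide (bm ≤ curMax) | none => false) then best
  else
    match remaining with
    | [] => some (path, curMax)
    | x :: xs =>
      (List.range (x :: xs).length).attach.foldl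
        (fun b i =>
          let e := PySem.List.pyGetD (x :: xs) ((i.1 : Nat) : Int) 0
          let d := match last with
            | none => curMax
            | some l => max curMax (PySem.Set.len (PySem.Set.symmDiff
                (PySem.Dict.getD (PySem.Dict.mk nb) l [])
                (PySem.Dict.getD (PySem.Dict.mk nb) e [])))
          pvDfs nb
            (PySem.List.slice (x :: xs) none (some (i.1 : Int)) ++
             PySem.List.slice (x :: xs) (some ((i.1 : Int) + 1)) none)
            (some e) d (path ++ [e]) b)
        best
termination_by remaining.length
decreasing_by
  have hi : i.1 < (x :: xs).length := List.mem_range.mp i.2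
  rw [PySem.List.slice_to _ (by positivity), PySem.List.slice_from _ (by positivity)]
  simp only [List.length_append, List.length_take, List.length_drop, Int.toNat_natCast]
  have h1 : ((i.1 : Int) + 1).toNat = i.1 + 1 := by omega
  rw [h1]
  simp only [List.length_cons] at hi ⊢
  omega

def brute_force_optimal_alt (emitters : List Int) (neighborhoods : List (Int × List Int)) :
    Option (List Int) × Option Int :=
  if 11 < emitters.length then (none, none)
  else
    match pvDfs neighborhoods emitters none 0 [] none with
    | none => (none, none)
    | some (p, m) => (some p, some m)

-- ===== PRECONDITION & SPEC =====
-- Pre_ excludes exactly the KeyError inputs: with 2 <= len(emitters) <= 11 both Pythons look every emitter up in the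
-- neighborhoods dict and raise KeyError if one is missing; with len < 2 or len > 11 no lookup happens.
def Pre_brute_force_optimal (emitters : List Int) (neighborhoods : List (Int × List Int)) : Prop :=
  emitters.length ≤ 1 ∨ 11 < emitters.length ∨ ∀ e ∈ emitters, e ∈ neighborhoods.map Prod.fst
instance (emitters : List Int) (neighborhoods : List (Int × List Int)) : Decidable (Pre_brute_force_optimal emitters neighborhoods) := by unfold Pre_brute_force_optimal; infer_instance
def pvWitness_brute_force_optimal : List Int × (List (Int × List Int)) :=
  ([0, 1, 2], [(0, [1, 2]), (1, [2, 3]), (2, [])])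

def Spec_brute_force_optimal (emitters : List Int) (neighborhoods : List (Int × List Int)) (out : Option (List Int) × Option Int) : Prop := out = brute_force_optimal_alt emitters neighborhoods
instance (emitters : List Int) (neighborhoods : List (Int × List Int)) (out : Option (List Int) × Option Int) : Decidable (Spec_brute_force_optimal emitters neighborhoods out) := by unfold Spec_brute_force_optimal; infer_instance

-- ===== CLAIM (what is proved, stated in full; the proofs are below) =====
def Claim_equal_brute_force_optimal : Prop := ∀ (emitters : List Int) (neighborhoods : List (Int × List Int)), Dom_brute_force_optimal emitters neighborhoods → Pre_brute_force_optimal emitters neighborhoods → Spec_brute_force_optimal emitters neighborhoods (brute_force_optimal emitters neighborhoods)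

-- ===== LEMMAS AND PROOFS =====

-- edge cost between two emitters (shared abbreviation for the proofs)
def pvDist (nb : List (Int × List Int)) (a b : Int) : Int :=
  PySem.Set.len (PySem.Set.symmDiff
    (PySem.Dict.getD (PySem.Dict.mk nb) a [])
    (PySem.Dict.getD (PySem.Dict.mk nb) b []))

-- costs of consecutive pairs, structurally
def pvPairs (nb : List (Int × List Int)) : List Int → List Int
  | a :: b :: rest => pvDist nb a b :: pvPairs nb (b :: rest)
  | _ => []

-- running maximum of the chain starting after 'last' with accumulator c
def pvMxFrom (nb : List (Int × List Int)) : Option Int → Int → List Int → Int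
  | _, c, [] => c
  | none, c, e :: rest => pvMxFrom nb (some e) c rest
  | some l, c, e :: rest => pvMxFrom nb (some e) (max c (pvDist nb l e)) rest

-- the abstract update A performs per permutation, on Option (path × max) state
def pvStep (b : Option (List Int × Int)) (full : List Int) (mx : Int) : Option (List Int × Int) :=
  if (match b with | none => true | some (_, bm) => mx < bm) then some (full, mx) else b

def pvConv : Option (List Int × Int) → Option (List Int) × Option Int
  | none => (none, none)
  | some (p, m) => (some p, some m)

theorem pvDist_nonneg (nb : List (Int × List Int)) (a b : Int) : 0 ≤ pvDist nb a b := by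
  simp [pvDist, PySem.Set.len]

theorem pvMxFrom_ge (nb : List (Int × List Int)) (p : List Int) :
    ∀ (last : Option Int) (c : Int), c ≤ pvMxFrom nb last c p := by
  induction p with
  | nil => intro last c; cases last <;> simp [pvMxFrom]
  | cons e rest ih =>
    intro last c
    cases last with
    | none => simpa [pvMxFrom] using ih (some e) c
    | some l =>
      calc c ≤ max c (pvDist nb l e) := le_max_left _ _
        _ ≤ _ := ih (some e) _

theorem pvMxFrom_some (nb : List (Int × List Int)) (p : List Int) :
    ∀ (l : Int) (c : Int), pvMxFrom nb (some l) c p = (pvPairs nb (l :: p)).foldl max c := by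
  induction p with
  | nil => intro l c; simp [pvMxFrom, pvPairs]
  | cons e rest ih =>
    intro l c
    simp only [pvMxFrom, pvPairs, List.foldl_cons]
    exact ih e (max c (pvDist nb l e))

theorem pvMxFrom_none (nb : List (Int × List Int)) (p : List Int) (c : Int) :
    pvMxFrom nb none c p = (pvPairs nb p).foldl max c := by
  cases p with
  | nil => simp [pvMxFrom, pvPairs]
  | cons e rest => simpa [pvMxFrom] using pvMxFrom_some nb rest e c

theorem pvPairs_getD (nb : List (Int × List Int)) (p : List Int) :
    (List.range (p.length - 1)).map
      (fun k => pvDist nb (p.getD k 0) (p.getD (k + 1) 0)) = pvPairs nb p := by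
  induction p with
  | nil => simp [pvPairs]
  | cons a rest ih =>
    cases rest with
    | nil => simp [pvPairs]
    | cons b rs =>
      simp only [List.length_cons, Nat.add_sub_cancel] at *
      rw [List.range_succ_eq_map, List.map_cons, List.map_map]
      simp only [Function.comp_def, List.getD_cons_succ, List.getD_cons_zero]
      exact congrArg (pvDist nb a b :: ·) ih

theorem pvCsd_eq_pairs (nb : List (Int × List Int)) (p : List Int) :
    consecutive_sym_diffs p nb = pvPairs nb p := by
  cases p with
  | nil => rfl
  | cons a rest =>
    unfold consecutive_sym_diffs
    have hlen : ((a :: rest).length : Int) - 1 = ((rest.length : Nat) : Int) := by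
      simp
    rw [hlen, PySem.List.pyRange_zero_natCast, List.map_map]
    rw [← pvPairs_getD nb (a :: rest)]
    simp only [List.length_cons, Nat.add_sub_cancel]
    apply List.map_congr_left
    intro k _
    have h1 : ((k : Int) + 1) = ((k + 1 : Nat) : Int) := by push_cast; ring
    simp only [Function.comp_def, h1, PySem.List.pyGetD_natCast, pvDist]

theorem pvPairs_nonneg (nb : List (Int × List Int)) (p : List Int) :
    ∀ x ∈ pvPairs nb p, 0 ≤ x := by
  induction p with
  | nil => simp [pvPairs]
  | cons a rest ih =>
    cases rest with
    | nil => simp [pvPairs]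
    | cons b rs =>
      intro x hx
      simp only [pvPairs, List.mem_cons] at hx
      rcases hx with h | h
      · exact h ▸ pvDist_nonneg nb a b
      · exact ih x h

theorem pvMxA_eq (nb : List (Int × List Int)) (p : List Int) :
    (match PySem.List.max? (consecutive_sym_diffs p nb) (fun x => x) with
      | none => (0 : Int) | some m => m) = pvMxFrom nb none 0 p := by
  rw [pvCsd_eq_pairs, pvMxFrom_none]
  cases h : pvPairs nb p with
  | nil => rfl
  | cons x t =>
    rw [PySem.List.max?_id_cons]
    have hx : 0 ≤ x := pvPairs_nonneg nb p x (h ▸ List.mem_cons_self)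
    simp only [List.foldl_cons]
    rw [max_eq_right hx]

theorem pvFoldl_keep {α β : Type} (f : β → α → β) (b : β) (l : List α)
    (h : ∀ x ∈ l, f b x = b) : l.foldl f b = b := by
  induction l with
  | nil => rfl
  | cons x t ih =>
    rw [List.foldl_cons, h x List.mem_cons_self]
    exact ih (fun y hy => h y (List.mem_cons_of_mem x hy))

-- when the prefix maximum already reaches the incumbent bottleneck, every update in the subtree is the identity
theorem pvPrune_keep (nb : List (Int × List Int)) (ps : List (List Int)) (path : List Int)
    (last : Option Int) (c : Int) (q : List Int) (bm : Int) (h : bm ≤ c) :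
    ps.foldl (fun b p => pvStep b (path ++ p) (pvMxFrom nb last c p)) (some (q, bm)) = some (q, bm) := by
  apply pvFoldl_keep
  intro p _
  have := pvMxFrom_ge nb p last c
  simp only [pvStep]
  rw [if_neg]
  simp only [decide_eq_true_eq]
  omega

theorem pvDfs_eq (nb : List (Int × List Int)) :
    ∀ (n : Nat) (remaining : List Int), remaining.length = n →
    ∀ (last : Option Int) (c : Int) (path : List Int) (best : Option (List Int × Int)),
      pvDfs nb remaining last c path best =
      (PySem.List.permutations remaining n).foldl
        (fun b p => pvStep b (path ++ p) (pvMxFrom nb last c p)) best := by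
  intro n
  induction n with
  | zero =>
    intro remaining hlen last c path best
    rw [List.length_eq_zero_iff] at hlen
    subst hlen
    rw [pvDfs.eq_def, PySem.List.permutations]
    cases best with
    | none => simp [pvStep, pvMxFrom]
    | some v =>
      obtain ⟨q, bm⟩ := v
      by_cases h : bm ≤ c
      · simp [pvStep, pvMxFrom, h, if_neg (by omega : ¬ c < bm)]
      · simp [pvStep, pvMxFrom, h, if_pos (by omega : c < bm)]
  | succ n ih =>
    intro remaining hlen last c path best
    match remaining, hlen with
    | x :: xs, hlen =>
    rw [pvDfs.eq_def]
    -- prune?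
    by_cases hp : (match best with | some (_, bm) => decide (bm ≤ c) | none => false) = true
    · rw [if_pos hp]
      cases best with
      | none => simp at hp
      | some v =>
        obtain ⟨q, bm⟩ := v
        simp only [decide_eq_true_eq] at hp
        exact (pvPrune_keep nb _ path last c q bm hp).symm
    · rw [if_neg hp]
      rw [PySem.List.permutations.eq_def]
      simp only []
      rw [List.foldl_flatMap]
      conv_rhs => rw [← List.foldl_attach]
      apply PySem.List.foldl_congr_mem
      intro b ipk hmem
      obtain ⟨i, hi⟩ := ipk
      have hilt : i < (x :: xs).length := List.mem_range.mp hi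
      have hget : (x :: xs)[i]? = some ((x :: xs)[i]) := List.getElem?_eq_getElem hilt
      rw [hget]
      simp only []
      rw [List.foldl_map]
      have hE : PySem.List.pyGetD (x :: xs) ((i : Nat) : Int) 0 = (x :: xs)[i] := by
        rw [PySem.List.pyGetD_natCast, List.getD_eq_getElem _ _ hilt]
      have hslice : PySem.List.slice (x :: xs) none (some (i : Int)) ++
          PySem.List.slice (x :: xs) (some ((i : Int) + 1)) none = (x :: xs).eraseIdx i := by
        have h1 : ((i : Int)).toNat = i := Int.toNat_natCast i
        have h2 : ((i : Int) + 1).toNat = i + 1 := by omega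
        rw [PySem.List.slice_to _ (by positivity), PySem.List.slice_from _ (by positivity),
            h1, h2, List.eraseIdx_eq_take_drop_succ]
      have hlen' : ((x :: xs).eraseIdx i).length = n := by
        rw [List.length_eraseIdx, if_pos hilt]
        omega
      rw [hE, hslice, ih _ hlen']
      apply PySem.List.foldl_congr_mem
      intro b' p _
      have hmx : pvMxFrom nb last c ((x :: xs)[i] :: p) =
          pvMxFrom nb (some ((x :: xs)[i]))
            (match last with
              | none => c
              | some l => max c (PySem.Set.len (PySem.Set.symmDiff
                  (PySem.Dict.getD (PySem.Dict.mk nb) l [])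
                  (PySem.Dict.getD (PySem.Dict.mk nb) ((x :: xs)[i]) [])))) p := by
        cases last <;> rfl
      rw [← List.append_cons, ← hmx]

theorem pvBestStep_conv (nb : List (Int × List Int)) (b : Option (List Int × Int)) (p : List Int) :
    pvBestStep nb (pvConv b) p = pvConv (pvStep b p (pvMxFrom nb none 0 p)) := by
  unfold pvBestStep pvStep
  rw [← pvMxA_eq nb p]
  cases b with
  | none => rfl
  | some v =>
    obtain ⟨q, bm⟩ := v
    by_cases h : (match PySem.List.max? (consecutive_sym_diffs p nb) (fun x => x) with
      | none => (0 : Int) | some m => m) < bm <;> simp [pvConv, h]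

theorem pvConv_foldl (nb : List (Int × List Int)) (ps : List (List Int)) :
    ∀ (b : Option (List Int × Int)),
      ps.foldl (pvBestStep nb) (pvConv b) =
      pvConv (ps.foldl (fun b p => pvStep b p (pvMxFrom nb none 0 p)) b) := by
  induction ps with
  | nil => intro b; rfl
  | cons p t ih =>
    intro b
    rw [List.foldl_cons, List.foldl_cons, pvBestStep_conv]
    exact ih _

-- ===== VERDICT (by name: the statement is the Claim_ definition above) =====
theorem brute_force_optimal_spec : Claim_equal_brute_force_optimal := by
  intro emitters neighborhoods _ _
  unfold Spec_brute_force_optimal brute_force_optimal brute_force_optimal_alt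
  by_cases h : 11 < emitters.length
  · simp [h]
  · simp only [h, if_false]
    rw [show ((none, none) : Option (List Int) × Option Int) = pvConv none from rfl,
        pvConv_foldl]
    have hd := pvDfs_eq neighborhoods emitters.length emitters rfl none 0 [] none
    simp only [List.nil_append] at hd
    rw [← hd]
    cases pvDfs neighborhoods emitters none 0 [] none with
    | none => rfl
    | some v => cases v; rfl
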